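-- pv_equiv track=rewrite | github.com/ShaynaMallett/Comp_Bio | bwmatching.py | L_2_F
-- ===== SOURCE A (Python) =====
-- def L_2_F(sortedLetters, transform, i):
--     counts = [0 for y in range(0, len(transform))]
--     A = 0
--     C = 0
--     G = 0
--     T = 0
--     End = 0
--     for x in range(0,len(transform)):
--         row = transform[x]
--         if row == 'A':
--             A += 1
--             counts[x] = A
--         if row == 'C':
--             C += 1
--             counts[x] = C
--         if row == 'G':
--             G += 1
--             counts[x] = G
--         if row == 'T':
--             T += 1
--             counts[x] = T
--         if row == '$':
--             End += 1
--             counts[x] = End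
--     symbol = transform[i]
--     occurence = counts[i]
--     if symbol == 'A':
--         return occurence
--     if symbol == 'C':
--         return A + occurence
--     if symbol == 'G':
--         return A+C+ occurence
--     if symbol == 'T':
--         return A+C+G+occurence
--     if symbol == '$':
--         return 0
-- ===== SOURCE B (Python) =====
-- def L_2_F(sortedLetters, transform, i):
--     symbol = transform[i]
--     if symbol == '$':
--         return 0
--     order = ['A', 'C', 'G', 'T']
--     offset = sum(transform.count(c) for c in order[:order.index(symbol)])
--     # rank of symbol at position i: occurrences strictly before i, plus this one
--     return offset + transform[:i].count(symbol) + 1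
-- ===== Notes on version B (the rewrite author's own statement) =====
-- stated objective: simpler
-- what changed: B drops A's per-position rank array and five running counters: it counts only the indexed symbol's earlier occurrences with one .count on a prefix slice and adds the total counts of the strictly smaller letters; Pre_ excludes positions holding a symbol outside {A,C,G,T,$}, where A falls off its if-chain and returns None.
-- outside the precondition, e.g. on L_2_F([], ['A', 'X', 'C'], 1): A returns None, B raises ValueError
import Mathlib
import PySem

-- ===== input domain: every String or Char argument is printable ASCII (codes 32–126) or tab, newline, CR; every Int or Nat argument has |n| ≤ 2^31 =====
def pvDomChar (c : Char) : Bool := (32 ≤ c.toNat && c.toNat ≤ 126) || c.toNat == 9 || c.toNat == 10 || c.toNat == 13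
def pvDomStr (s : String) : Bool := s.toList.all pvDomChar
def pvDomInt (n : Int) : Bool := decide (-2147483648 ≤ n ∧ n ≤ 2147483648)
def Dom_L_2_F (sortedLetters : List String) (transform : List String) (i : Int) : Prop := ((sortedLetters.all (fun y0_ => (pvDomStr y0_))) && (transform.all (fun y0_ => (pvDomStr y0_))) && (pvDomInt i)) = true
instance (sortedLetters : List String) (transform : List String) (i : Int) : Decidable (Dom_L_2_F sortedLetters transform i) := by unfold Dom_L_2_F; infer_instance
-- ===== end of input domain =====

-- B computes only the single value A returns (earlier occurrences of the indexed symbol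
-- plus one, plus the total counts of the strictly smaller letters), dropping A's
-- per-position rank array and its five running counters.

-- ===== PORT A =====
-- A's for-loop over range(len(transform)): state = (counts, A, C, G, T, End).
def aLoop (tr : List String) (x : Nat) (counts : List Int)
    (a c g t e : Int) : List Int × Int × Int × Int × Int × Int :=
  if h : x < tr.length then
    let row := tr[x]
    let a := if row = "A" then a + 1 else a
    let counts := if row = "A" then counts.set x a else counts
    let c := if row = "C" then c + 1 else c
    let counts := if row = "C" then counts.set x c else counts
    let g := if row = "G" then g + 1 else g
    let counts := if row = "G" then counts.set x g else counts
    let t := if row = "T" then t + 1 else t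
    let counts := if row = "T" then counts.set x t else counts
    let e := if row = "$" then e + 1 else e
    let counts := if row = "$" then counts.set x e else counts
    aLoop tr (x + 1) counts a c g t e
  else (counts, a, c, g, t, e)
termination_by tr.length - x

def L_2_F (sortedLetters : List String) (transform : List String) (i : Int) : Int :=
  let counts0 : List Int := List.replicate transform.length 0
  let st := aLoop transform 0 counts0 0 0 0 0 0
  let counts := st.1
  let a := st.2.1
  let c := st.2.2.1
  let g := st.2.2.2.1
  let t := st.2.2.2.2.1
  let symbol := (PySem.List.pyGet? transform i).getD ""
  let occurence := (PySem.List.pyGet? counts i).getD 0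
  if symbol = "A" then occurence
  else if symbol = "C" then a + occurence
  else if symbol = "G" then a + c + occurence
  else if symbol = "T" then a + c + g + occurence
  else if symbol = "$" then 0
  else 0  -- Python falls off the if-chain and returns None here; excluded by Pre_L_2_F

-- ===== PORT B =====
def L_2_F_alt (sortedLetters : List String) (transform : List String) (i : Int) : Int :=
  let symbol := (PySem.List.pyGet? transform i).getD ""
  if symbol = "$" then 0
  else
    let order : List String := ["A", "C", "G", "T"]
    let k := (PySem.List.index? order symbol).getD 0
    let offset : Int := ((order.take k).map (fun c => (PySem.List.count transform c : Int))).sum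
    offset + PySem.List.count (PySem.List.slice transform none (some i)) symbol + 1

-- ===== PRECONDITION & SPEC =====
-- Pre_ excludes out-of-range i (A raises IndexError) and in-range positions holding a
-- symbol outside {A,C,G,T,$}, where A falls off its if-chain and returns None, which is
-- not an int (B raises ValueError there, from order.index(symbol)).
def Pre_L_2_F (sortedLetters : List String) (transform : List String) (i : Int) : Prop :=
  PySem.Raise.InRange transform.length i ∧
    (PySem.List.pyGet? transform i).getD "" ∈ (["A", "C", "G", "T", "$"] : List String)
instance (sortedLetters : List String) (transform : List String) (i : Int) : Decidable (Pre_L_2_F sortedLetters transform i) := by unfold Pre_L_2_F; infer_instance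

def pvWitness_L_2_F : List String × List String × Int := ([], ["A", "C", "G", "A", "$"], 3)

def Spec_L_2_F (sortedLetters : List String) (transform : List String) (i : Int) (out : Int) : Prop := out = L_2_F_alt sortedLetters transform i
instance (sortedLetters : List String) (transform : List String) (i : Int) (out : Int) : Decidable (Spec_L_2_F sortedLetters transform i out) := by unfold Spec_L_2_F; infer_instance

-- ===== CLAIM (what is proved, stated in full; the proofs are below) =====
def Claim_equal_L_2_F : Prop := ∀ (sortedLetters : List String) (transform : List String) (i : Int), Dom_L_2_F sortedLetters transform i → Pre_L_2_F sortedLetters transform i → Spec_L_2_F sortedLetters transform i (L_2_F sortedLetters transform i)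

-- ===== LEMMAS AND PROOFS =====

theorem count_drop_succ (tr : List String) (x : Nat) (h : x < tr.length) (v : String) :
    (List.drop x tr).count v = (List.drop (x + 1) tr).count v + (if tr[x] = v then 1 else 0) := by
  rw [List.drop_eq_getElem_cons h, List.count_cons]
  by_cases hv : tr[x] = v <;> simp [hv]

theorem aLoop_counters (tr : List String) (x : Nat) (counts : List Int) (a c g t e : Int) :
    (aLoop tr x counts a c g t e).2 =
      (a + ((tr.drop x).count "A" : Int), c + ((tr.drop x).count "C" : Int),
       g + ((tr.drop x).count "G" : Int), t + ((tr.drop x).count "T" : Int),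
       e + ((tr.drop x).count "$" : Int)) := by
  unfold aLoop
  split
  case isTrue h =>
    have IH := aLoop_counters tr (x + 1)
    have hcd := count_drop_succ tr x h
    by_cases hA : tr[x] = "A"
    · simp [hA, IH, hcd]; omega
    · by_cases hC : tr[x] = "C"
      · simp [hC, IH, hcd]; omega
      · by_cases hG : tr[x] = "G"
        · simp [hG, IH, hcd]; omega
        · by_cases hT : tr[x] = "T"
          · simp [hT, IH, hcd]; omega
          · by_cases hE : tr[x] = "$"
            · simp [hE, IH, hcd]; omega
            · simp [hA, hC, hG, hT, hE, IH, hcd]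
  case isFalse h =>
    have hnil : tr.drop x = [] := List.drop_eq_nil_of_le (by omega)
    simp [hnil]
termination_by tr.length - x

theorem aLoop_get_lt (tr : List String) (p : Nat) : ∀ (x : Nat), p < x →
    ∀ (counts : List Int) (a c g t e : Int),
    ((aLoop tr x counts a c g t e).1)[p]? = counts[p]? := by
  intro x hp counts a c g t e
  unfold aLoop
  split
  case isTrue h =>
    have hne : x ≠ p := by omega
    have IH := aLoop_get_lt tr p (x + 1) (by omega)
    have hset := fun (l : List Int) (v : Int) => List.getElem?_set_ne hne (l := l) (a := v)
    by_cases hA : tr[x] = "A"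
    · simp [hA, IH, hset]
    · by_cases hC : tr[x] = "C"
      · simp [hC, IH, hset]
      · by_cases hG : tr[x] = "G"
        · simp [hG, IH, hset]
        · by_cases hT : tr[x] = "T"
          · simp [hT, IH, hset]
          · by_cases hE : tr[x] = "$"
            · simp [hE, IH, hset]
            · simp [hA, hC, hG, hT, hE, IH]
  case isFalse h => rfl
termination_by x => tr.length - x

theorem aLoop_length (tr : List String) : ∀ (x : Nat) (counts : List Int) (a c g t e : Int),
    ((aLoop tr x counts a c g t e).1).length = counts.length := by
  intro x counts a c g t e
  unfold aLoop
  split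
  case isTrue h =>
    have IH := aLoop_length tr (x + 1)
    by_cases hA : tr[x] = "A"
    · simp [hA, IH]
    · by_cases hC : tr[x] = "C"
      · simp [hC, IH]
      · by_cases hG : tr[x] = "G"
        · simp [hG, IH]
        · by_cases hT : tr[x] = "T"
          · simp [hT, IH]
          · by_cases hE : tr[x] = "$"
            · simp [hE, IH]
            · simp [hA, hC, hG, hT, hE, IH]
  case isFalse h => rfl
termination_by x => tr.length - x

theorem count_take_succ (tr : List String) (x : Nat) (h : x < tr.length) (n : Nat) (v : String) :
    ((tr.drop x).take (n + 1)).count v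
      = ((tr.drop (x + 1)).take n).count v + (if tr[x] = v then 1 else 0) := by
  rw [List.drop_eq_getElem_cons h, List.take_succ_cons, List.count_cons]
  by_cases hv : tr[x] = v <;> simp [hv]

set_option maxHeartbeats 1000000 in
theorem aLoop_get (tr : List String) (p : Nat) (hp : p < tr.length) : ∀ (x : Nat), x ≤ p →
    ∀ (counts : List Int), counts.length = tr.length → ∀ (a c g t e : Int),
    (tr[p] = "A" ∨ tr[p] = "C" ∨ tr[p] = "G" ∨ tr[p] = "T" ∨ tr[p] = "$") →
    ((aLoop tr x counts a c g t e).1)[p]? =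
      some ((if tr[p] = "A" then a else if tr[p] = "C" then c else if tr[p] = "G" then g
             else if tr[p] = "T" then t else e)
            + (((tr.drop x).take (p + 1 - x)).count tr[p] : Int)) := by
  intro x hxp counts hlen a c g t e hmem
  have hxlt : x < tr.length := by omega
  unfold aLoop
  rw [dif_pos hxlt]
  by_cases hxp' : x = p
  · subst hxp'
    have hone : ∀ v, tr[x] = v → List.count v (List.take 1 (List.drop x tr)) = 1 := by
      intro v hv
      rw [← hv, List.drop_eq_getElem_cons hxlt, show (1 : Nat) = 0 + 1 from rfl,
        List.take_succ_cons]
      simp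
    have hself : ∀ v : Int, (counts.set x v)[x]? = some v :=
      fun v => List.getElem?_set_self (by omega)
    have hlt := aLoop_get_lt tr x (x + 1) (by omega)
    by_cases hA : tr[x] = "A"
    · simp [hA, hlt, hself, hone _ hA]
    · by_cases hC : tr[x] = "C"
      · simp [hC, hlt, hself, hone _ hC]
      · by_cases hG : tr[x] = "G"
        · simp [hG, hlt, hself, hone _ hG]
        · by_cases hT : tr[x] = "T"
          · simp [hT, hlt, hself, hone _ hT]
          · by_cases hE : tr[x] = "$"
            · simp [hE, hlt, hself, hone _ hE]
            · simp_all
  · have hxp2 : x < p := by omega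
    have hsplit := count_take_succ tr x hxlt (p - x) tr[p]
    rw [show p - x + 1 = p + 1 - x by omega] at hsplit
    have IH := fun (counts' : List Int) (hl : counts'.length = tr.length)
        (a c g t e : Int) => aLoop_get tr p hp (x + 1) (by omega) counts' hl a c g t e hmem
    have hfin : ∀ a' c' g' t' e' : Int,
        a' = a + (if tr[x] = "A" then 1 else 0) → c' = c + (if tr[x] = "C" then 1 else 0) →
        g' = g + (if tr[x] = "G" then 1 else 0) → t' = t + (if tr[x] = "T" then 1 else 0) →
        e' = e + (if tr[x] = "$" then 1 else 0) →
        some ((if tr[p] = "A" then a' else if tr[p] = "C" then c' else if tr[p] = "G" then g'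
               else if tr[p] = "T" then t' else e')
              + (((tr.drop (x + 1)).take (p + 1 - (x + 1))).count tr[p] : Int)) =
        some ((if tr[p] = "A" then a else if tr[p] = "C" then c else if tr[p] = "G" then g
               else if tr[p] = "T" then t else e)
              + (((tr.drop x).take (p + 1 - x)).count tr[p] : Int)) := by
      intro a' c' g' t' e' ha hc hg ht he
      subst ha hc hg ht he
      rw [hsplit, show p + 1 - (x + 1) = p - x by omega, Option.some.injEq]
      rcases hmem with hv | hv | hv | hv | hv <;> simp only [hv, String.reduceEq, reduceIte] <;>
        split_ifs <;> (try simp_all) <;> omega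
    by_cases hA : tr[x] = "A"
    · simp only [hA, String.reduceEq, reduceIte]
      rw [IH (counts.set x (a + 1)) (by simp [hlen]) (a + 1) c g t e]
      exact hfin _ _ _ _ _ (by simp [hA]) (by simp [hA]) (by simp [hA]) (by simp [hA])
        (by simp [hA])
    · by_cases hC : tr[x] = "C"
      · simp only [hC, String.reduceEq, reduceIte]
        rw [IH (counts.set x (c + 1)) (by simp [hlen]) a (c + 1) g t e]
        exact hfin _ _ _ _ _ (by simp [hA]) (by simp [hC]) (by simp [hC]) (by simp [hC])
          (by simp [hC])
      · by_cases hG : tr[x] = "G"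
        · simp only [hG, String.reduceEq, reduceIte]
          rw [IH (counts.set x (g + 1)) (by simp [hlen]) a c (g + 1) t e]
          exact hfin _ _ _ _ _ (by simp [hA]) (by simp [hC]) (by simp [hG]) (by simp [hG])
            (by simp [hG])
        · by_cases hT : tr[x] = "T"
          · simp only [hT, String.reduceEq, reduceIte]
            rw [IH (counts.set x (t + 1)) (by simp [hlen]) a c g (t + 1) e]
            exact hfin _ _ _ _ _ (by simp [hA]) (by simp [hC]) (by simp [hG]) (by simp [hT])
              (by simp [hT])
          · by_cases hE : tr[x] = "$"
            · simp only [hE, String.reduceEq, reduceIte]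
              rw [IH (counts.set x (e + 1)) (by simp [hlen]) a c g t (e + 1)]
              exact hfin _ _ _ _ _ (by simp [hA]) (by simp [hC]) (by simp [hG]) (by simp [hT])
                (by simp [hE])
            · simp only [hA, hC, hG, hT, hE, reduceIte]
              rw [IH counts hlen a c g t e]
              exact hfin _ _ _ _ _ (by simp [hA]) (by simp [hC]) (by simp [hG]) (by simp [hT])
                (by simp [hE])
termination_by x => tr.length - x

theorem sel_zero (P1 P2 P3 P4 : Prop) [Decidable P1] [Decidable P2] [Decidable P3]
    [Decidable P4] :
    (if P1 then (0 : Int) else if P2 then 0 else if P3 then 0 else if P4 then 0 else 0) = 0 := by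
  split_ifs <;> rfl

theorem count_take_self (tr : List String) (jn : Nat) (h : jn < tr.length) :
    List.count tr[jn] (tr.take (jn + 1)) = List.count tr[jn] (tr.take jn) + 1 := by
  rw [List.take_add_one, List.getElem?_eq_getElem h, Option.toList_some, List.count_append]
  simp

theorem L_2_F_spec : Claim_equal_L_2_F := by
  intro sl tr i _dom hpre
  obtain ⟨hin, hsym⟩ := hpre
  obtain ⟨hlo, hhi⟩ := hin
  -- normalise the Python index i to a Nat position jn
  obtain ⟨jn, hjn, hkey, hslice⟩ :
      ∃ jn : Nat, jn < tr.length ∧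
        (∀ (α : Type) (ys : List α), ys.length = tr.length → PySem.List.pyGet? ys i = ys[jn]?) ∧
        PySem.List.slice tr none (some i) = tr.take jn := by
    by_cases hi : 0 ≤ i
    · refine ⟨i.toNat, by omega, fun α ys hl => ?_, ?_⟩
      · rw [PySem.List.pyGet?_of_nonneg ys hi]
      · rw [PySem.List.slice_to tr hi]
    · refine ⟨(i + tr.length).toNat, by omega, fun α ys hl => ?_, ?_⟩
      · have hk : i = -(((-i).toNat : Nat) : Int) := by omega
        rw [hk, PySem.List.pyGet?_neg_natCast ys (-i).toNat (by omega) (by omega)]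
        congr 1
        omega
      · have hk : i = -(((-i).toNat : Nat) : Int) := by omega
        rw [hk, PySem.List.slice_to_neg_natCast tr (-i).toNat (by omega)]
        congr 1
        omega
  have htr : PySem.List.pyGet? tr i = some tr[jn] := by
    rw [hkey String tr rfl, List.getElem?_eq_getElem hjn]
  rw [htr] at hsym
  simp only [Option.getD_some, List.mem_cons, List.not_mem_nil, or_false] at hsym
  -- the state computed by A's loop
  have hclen : ((aLoop tr 0 (List.replicate tr.length (0 : Int)) 0 0 0 0 0).1).length
      = tr.length := by
    rw [aLoop_length]
    exact List.length_replicate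
  have hcnt := aLoop_counters tr 0 (List.replicate tr.length (0 : Int)) 0 0 0 0 0
  have hget := aLoop_get tr jn hjn 0 (Nat.zero_le _)
      (List.replicate tr.length (0 : Int)) List.length_replicate 0 0 0 0 0 hsym
  rw [List.drop_zero, Nat.sub_zero, sel_zero, zero_add] at hget
  have hocc : PySem.List.pyGet? ((aLoop tr 0 (List.replicate tr.length (0 : Int)) 0 0 0 0 0).1) i
      = some ((List.count tr[jn] (tr.take (jn + 1)) : Int)) := by
    rw [hkey Int _ hclen, hget]
  have hct := count_take_self tr jn hjn
  -- evaluate both programs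
  unfold Spec_L_2_F L_2_F L_2_F_alt
  simp only [htr, Option.getD_some, hcnt, hocc, hslice, List.drop_zero, PySem.List.count_eq]
  rcases hsym with hv | hv | hv | hv | hv <;>
    simp [hv, PySem.List.index?, List.idxOf?, List.findIdx?, List.findIdx?.go] <;>
    rw [hv] at hct <;> omega
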